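-- pv_equiv track=rewrite | github.com/serlabel/Tuenti-Challenge-6 | 04/hadouken.py | almost_combo
-- ===== SOURCE A (Python) =====
-- def almost_combo(moves):
--     combos = 0
--     for i in range(len(moves)-2):
--         # D-RD-R-(P)
--         # This case is also True for L-LD-D-RD-R-(P)
--         # but I should count only one (not two)
--         if (moves[i] == 'D' and moves[i+1] == 'RD' and
--             moves[i+2] == 'R' and (i+3 == len(moves) or moves[i+3] != 'P')):
--             combos += 1
--         # R-D-RD-(P)
--         if (moves[i] == 'R' and moves[i+1] == 'D' and
--             moves[i+2] == 'RD' and (i+3 == len(moves) or moves[i+3] != 'P')):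
--             combos += 1
--         # D-LD-L-(K)
--         # This case is also True for R-RD-D-LD-L-(K)
--         if (moves[i] == 'D' and moves[i+1] == 'LD' and
--             moves[i+2] == 'L' and (i+3 == len(moves) or moves[i+3] != 'K')):
--             combos += 1
--     return combos
-- ===== SOURCE B (Python) =====
-- def count_pattern(moves, triple, forbidden):
--     quads = zip(moves, moves[1:], moves[2:], moves[3:] + [None])
--     return sum(1 for a, b, c, d in quads if (a, b, c) == triple and d != forbidden)
--
-- def almost_combo(moves):
--     return (count_pattern(moves, ('D', 'RD', 'R'), 'P')
--             + count_pattern(moves, ('R', 'D', 'RD'), 'P')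
--             + count_pattern(moves, ('D', 'LD', 'L'), 'K'))
-- ===== Notes on version B (the rewrite author's own statement) =====
-- stated objective: simpler
-- what changed: Replaces the single indexed loop testing three hard-coded patterns with a generic count_pattern helper that zips the list with its shifted tails (a None sentinel standing for end-of-list) and sums matches, called once per pattern.
import Mathlib
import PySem

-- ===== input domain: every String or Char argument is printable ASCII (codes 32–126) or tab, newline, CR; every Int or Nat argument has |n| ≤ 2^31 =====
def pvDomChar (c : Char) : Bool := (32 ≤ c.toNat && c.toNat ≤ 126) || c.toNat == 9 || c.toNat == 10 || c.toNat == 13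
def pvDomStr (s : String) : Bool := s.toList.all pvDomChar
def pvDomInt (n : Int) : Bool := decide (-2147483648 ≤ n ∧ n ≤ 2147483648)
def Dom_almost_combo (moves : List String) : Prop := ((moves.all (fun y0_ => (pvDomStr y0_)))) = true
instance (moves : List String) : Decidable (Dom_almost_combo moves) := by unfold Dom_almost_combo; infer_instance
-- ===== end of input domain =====

-- B replaces A's single indexed three-pattern loop by a generic per-pattern count over
-- the list zipped with its shifted tails (None sentinel at the end), called three times (objective: simpler).


-- ===== PORT A =====
def almost_combo (moves : List String) : Int :=
  (PySem.List.pyRange 0 ((moves.length : Int) - 2) 1).foldl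
    (fun combos i =>
      let combos := if PySem.List.pyGet? moves i = some "D" ∧ PySem.List.pyGet? moves (i+1) = some "RD" ∧
          PySem.List.pyGet? moves (i+2) = some "R" ∧
          (i+3 = (moves.length : Int) ∨ PySem.List.pyGet? moves (i+3) ≠ some "P")
        then combos + 1 else combos
      let combos := if PySem.List.pyGet? moves i = some "R" ∧ PySem.List.pyGet? moves (i+1) = some "D" ∧
          PySem.List.pyGet? moves (i+2) = some "RD" ∧
          (i+3 = (moves.length : Int) ∨ PySem.List.pyGet? moves (i+3) ≠ some "P")
        then combos + 1 else combos
      let combos := if PySem.List.pyGet? moves i = some "D" ∧ PySem.List.pyGet? moves (i+1) = some "LD" ∧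
          PySem.List.pyGet? moves (i+2) = some "L" ∧
          (i+3 = (moves.length : Int) ∨ PySem.List.pyGet? moves (i+3) ≠ some "K")
        then combos + 1 else combos
      combos) 0

-- ===== PORT B =====
def count_pattern (moves : List String) (triple : String × String × String) (forbidden : String) : Int :=
  let quads := moves.zip ((PySem.List.slice moves (some 1) none).zip
    ((PySem.List.slice moves (some 2) none).zip
      ((PySem.List.slice moves (some 3) none).map some ++ [(none : Option String)])))
  (quads.countP (fun q => decide ((q.1, q.2.1, q.2.2.1) = triple ∧ q.2.2.2 ≠ some forbidden)) : Int)

def almost_combo_alt (moves : List String) : Int :=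
  count_pattern moves ("D", "RD", "R") "P" + count_pattern moves ("R", "D", "RD") "P"
    + count_pattern moves ("D", "LD", "L") "K"

-- ===== PRECONDITION & SPEC =====
def Spec_almost_combo (moves : List String) (out : Int) : Prop := out = almost_combo_alt moves
instance (moves : List String) (out : Int) : Decidable (Spec_almost_combo moves out) := by unfold Spec_almost_combo; infer_instance

-- ===== CLAIM (what is proved, stated in full; the proofs are below) =====
def Claim_equal_almost_combo : Prop := ∀ (moves : List String), Dom_almost_combo moves → Spec_almost_combo moves (almost_combo moves)

-- ===== LEMMAS AND PROOFS =====

/-- Structural single-pattern count: reference shape both ports are reduced to. -/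
def sRec (x y z f : String) : List String → Int
  | a :: b :: c :: rest =>
      (if a = x ∧ b = y ∧ c = z ∧ rest.head? ≠ some f then 1 else 0) + sRec x y z f (b :: c :: rest)
  | _ => 0
termination_by l => l.length

/-- Structural combined count: reference shape for A. -/
def aRec : List String → Int
  | a :: b :: c :: rest =>
      (if a = "D" ∧ b = "RD" ∧ c = "R" ∧ rest.head? ≠ some "P" then 1 else 0)
    + (if a = "R" ∧ b = "D" ∧ c = "RD" ∧ rest.head? ≠ some "P" then 1 else 0)
    + (if a = "D" ∧ b = "LD" ∧ c = "L" ∧ rest.head? ≠ some "K" then 1 else 0)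
    + aRec (b :: c :: rest)
  | _ => 0
termination_by l => l.length

theorem aRec_eq_sRec (moves : List String) :
    aRec moves = sRec "D" "RD" "R" "P" moves + sRec "R" "D" "RD" "P" moves + sRec "D" "LD" "L" "K" moves := by
  induction moves with
  | nil => simp [aRec, sRec]
  | cons a ms ih =>
    match ms with
    | [] => simp [aRec, sRec]
    | [b] => simp [aRec, sRec]
    | b :: c :: rest =>
      rw [aRec, sRec, sRec, sRec, ih]
      ring

/-- Nat-index form of A's per-step contribution. -/
def hA (moves : List String) (k : Nat) : Int :=
    (if moves[k]? = some "D" ∧ moves[k+1]? = some "RD" ∧ moves[k+2]? = some "R" ∧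
        (k+3 = moves.length ∨ moves[k+3]? ≠ some "P") then 1 else 0)
  + (if moves[k]? = some "R" ∧ moves[k+1]? = some "D" ∧ moves[k+2]? = some "RD" ∧
        (k+3 = moves.length ∨ moves[k+3]? ≠ some "P") then 1 else 0)
  + (if moves[k]? = some "D" ∧ moves[k+1]? = some "LD" ∧ moves[k+2]? = some "L" ∧
        (k+3 = moves.length ∨ moves[k+3]? ≠ some "K") then 1 else 0)

theorem hA_succ (a : String) (ms : List String) (k : Nat) : hA (a :: ms) (k+1) = hA ms k := by
  have g0 : (a :: ms)[k+1]? = ms[k]? := by simp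
  have g1 : (a :: ms)[k+1+1]? = ms[k+1]? := by simp
  have g2 : (a :: ms)[k+1+2]? = ms[k+2]? := by
    rw [show k+1+2 = (k+2)+1 by omega]; simp
  have g3 : (a :: ms)[k+1+3]? = ms[k+3]? := by
    rw [show k+1+3 = (k+3)+1 by omega]; simp
  have hiff : (k + 1 + 3 = (a :: ms).length) ↔ (k + 3 = ms.length) := by
    simp only [List.length_cons]; omega
  simp only [hA, g0, g1, g2, g3, hiff]

theorem foldA (moves : List String) (l : List Int) (init : Int) :
    l.foldl (fun combos i =>
      let combos := if PySem.List.pyGet? moves i = some "D" ∧ PySem.List.pyGet? moves (i+1) = some "RD" ∧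
          PySem.List.pyGet? moves (i+2) = some "R" ∧
          (i+3 = (moves.length : Int) ∨ PySem.List.pyGet? moves (i+3) ≠ some "P")
        then combos + 1 else combos
      let combos := if PySem.List.pyGet? moves i = some "R" ∧ PySem.List.pyGet? moves (i+1) = some "D" ∧
          PySem.List.pyGet? moves (i+2) = some "RD" ∧
          (i+3 = (moves.length : Int) ∨ PySem.List.pyGet? moves (i+3) ≠ some "P")
        then combos + 1 else combos
      let combos := if PySem.List.pyGet? moves i = some "D" ∧ PySem.List.pyGet? moves (i+1) = some "LD" ∧
          PySem.List.pyGet? moves (i+2) = some "L" ∧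
          (i+3 = (moves.length : Int) ∨ PySem.List.pyGet? moves (i+3) ≠ some "K")
        then combos + 1 else combos
      combos) init
    = init + (l.map (fun i =>
        (if PySem.List.pyGet? moves i = some "D" ∧ PySem.List.pyGet? moves (i+1) = some "RD" ∧
            PySem.List.pyGet? moves (i+2) = some "R" ∧
            (i+3 = (moves.length : Int) ∨ PySem.List.pyGet? moves (i+3) ≠ some "P") then 1 else 0)
      + (if PySem.List.pyGet? moves i = some "R" ∧ PySem.List.pyGet? moves (i+1) = some "D" ∧
            PySem.List.pyGet? moves (i+2) = some "RD" ∧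
            (i+3 = (moves.length : Int) ∨ PySem.List.pyGet? moves (i+3) ≠ some "P") then 1 else 0)
      + (if PySem.List.pyGet? moves i = some "D" ∧ PySem.List.pyGet? moves (i+1) = some "LD" ∧
            PySem.List.pyGet? moves (i+2) = some "L" ∧
            (i+3 = (moves.length : Int) ∨ PySem.List.pyGet? moves (i+3) ≠ some "K") then 1 else 0))).sum := by
  induction l generalizing init with
  | nil => simp
  | cons i l ih =>
    simp only [List.foldl_cons, List.map_cons, List.sum_cons, ih]
    split_ifs <;> ring

theorem almost_combo_eq_sum (moves : List String) :
    almost_combo moves = ((List.range (moves.length - 2)).map (hA moves)).sum := by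
  rw [almost_combo, foldA, PySem.List.pyRange_one, List.map_map]
  have hN : (((moves.length : Int) - 2) - 0).toNat = moves.length - 2 := by omega
  rw [hN, zero_add]
  congr 1
  apply List.map_congr_left
  intro k _
  have e0 : (0:Int) + (k:Int) = ((k : Nat) : Int) := by ring
  have e1 : ((k:Int) + 1) = (((k+1 : Nat)) : Int) := by push_cast; ring
  have e2 : ((k:Int) + 2) = (((k+2 : Nat)) : Int) := by push_cast; ring
  have e3 : ((k:Int) + 3) = (((k+3 : Nat)) : Int) := by push_cast; ring
  have hiff : (((k:Int)) + 3 = (moves.length : Int)) ↔ (k + 3 = moves.length) := by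
    constructor <;> intro h <;> omega
  simp only [Function.comp, e0, e1, e2, e3, PySem.List.pyGet?_natCast, hA]
  simp only [← e3, hiff]

theorem sum_hA_eq_aRec (moves : List String) :
    ((List.range (moves.length - 2)).map (hA moves)).sum = aRec moves := by
  induction moves with
  | nil => simp [aRec]
  | cons a ms ih =>
    match ms with
    | [] => simp [aRec]
    | [b] => simp [aRec]
    | b :: c :: rest =>
      have hlen : (a :: b :: c :: rest).length - 2 = ((b :: c :: rest).length - 2) + 1 := by
        simp only [List.length_cons]; omega
      rw [hlen, List.range_succ_eq_map, List.map_cons, List.sum_cons, List.map_map]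
      have h0 : hA (a :: b :: c :: rest) 0 =
          (if a = "D" ∧ b = "RD" ∧ c = "R" ∧ rest.head? ≠ some "P" then 1 else 0)
        + (if a = "R" ∧ b = "D" ∧ c = "RD" ∧ rest.head? ≠ some "P" then 1 else 0)
        + (if a = "D" ∧ b = "LD" ∧ c = "L" ∧ rest.head? ≠ some "K" then 1 else 0) := by
        cases rest with
        | nil => simp [hA]
        | cons r rs => simp [hA]; try omega
      have hsucc : ((List.range ((b :: c :: rest).length - 2)).map (hA (a :: b :: c :: rest) ∘ Nat.succ)).sum
          = ((List.range ((b :: c :: rest).length - 2)).map (hA (b :: c :: rest))).sum := by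
        congr 1
        apply List.map_congr_left
        intro k _
        exact hA_succ a _ k
      rw [h0, hsucc, ih, aRec]

/-- One cons step of the zipped-quads list. -/
theorem quads_cons (a b c : String) (rest : List String) :
    (a :: b :: c :: rest).zip ((b :: c :: rest).zip ((c :: rest).zip (rest.map some ++ [(none : Option String)])))
    = (a, b, c, rest.head?) :: (b :: c :: rest).zip ((c :: rest).zip (rest.zip ((rest.drop 1).map some ++ [(none : Option String)]))) := by
  cases rest <;> simp

theorem count_pattern_eq_sRec (moves : List String) (x y z f : String) :
    count_pattern moves (x, y, z) f = sRec x y z f moves := by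
  induction moves with
  | nil => simp [count_pattern, sRec, PySem.List.slice]
  | cons a ms ih =>
    match ms with
    | [] => simp [count_pattern, sRec, PySem.List.slice]
    | [b] => simp [count_pattern, sRec, PySem.List.slice]
    | b :: c :: rest =>
      have s1 : ∀ l : List String, PySem.List.slice l (some 1) none = l.drop 1 := by
        intro l; rw [show (1:Int) = ((1:Nat):Int) by norm_num]; exact PySem.List.slice_from_natCast l 1
      have s2 : ∀ l : List String, PySem.List.slice l (some 2) none = l.drop 2 := by
        intro l; rw [show (2:Int) = ((2:Nat):Int) by norm_num]; exact PySem.List.slice_from_natCast l 2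
      have s3 : ∀ l : List String, PySem.List.slice l (some 3) none = l.drop 3 := by
        intro l; rw [show (3:Int) = ((3:Nat):Int) by norm_num]; exact PySem.List.slice_from_natCast l 3
      rw [count_pattern] at ih ⊢
      simp only [s1, s2, s3, List.drop] at ih ⊢
      rw [quads_cons, List.countP_cons]
      push_cast
      rw [ih, sRec]
      have hd : (decide ((a, b, c) = (x, y, z) ∧ rest.head? ≠ some f) = true)
          ↔ (a = x ∧ b = y ∧ c = z ∧ rest.head? ≠ some f) := by
        simp [Prod.ext_iff, and_assoc]
      simp only [hd]
      split_ifs <;> ring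

theorem alt_eq (moves : List String) :
    almost_combo_alt moves = sRec "D" "RD" "R" "P" moves + sRec "R" "D" "RD" "P" moves + sRec "D" "LD" "L" "K" moves := by
  rw [almost_combo_alt, count_pattern_eq_sRec, count_pattern_eq_sRec, count_pattern_eq_sRec]

-- ===== VERDICT (by name: the statement is the Claim_ definition above) =====
theorem almost_combo_spec : Claim_equal_almost_combo := by
  intro moves _
  unfold Spec_almost_combo
  rw [almost_combo_eq_sum, sum_hA_eq_aRec, aRec_eq_sRec, alt_eq]
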